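-- pv_equiv track=rewrite | github.com/ACM-UCI/ACM-UCI-Website | src/solutions/Fall 2018/2/rational.py | compute_tree
-- ===== SOURCE A (Python) =====
-- def compute_tree(decisions):
--     p = 1
--     q = 1
--     for i in decisions[1:]:
--         if i == '1':
--             q = p + q
--         else:
--             p = p+q
--
--
--     return (p,q)
-- ===== SOURCE B (Python) =====
-- def compute_tree(decisions):
--     # run-length scan over decisions[1:]: a run of k '1's does q += k*p,
--     # a run of k non-'1's does p += k*q
--     rest = decisions[1:]
--     p = 1
--     q = 1
--     i = 0
--     n = len(rest)
--     while i < n: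
--         j = i
--         while j < n and rest[j] == rest[i]:
--             j += 1
--         k = j - i
--         if rest[i] == '1':
--             q += k * p
--         else:
--             p += k * q
--         i = j
--     return (p, q)
-- ===== Notes on version B (the rewrite author's own statement) =====
-- stated objective: alternative
-- what changed: B collapses decisions[1:] into maximal runs of equal symbols and applies each run with one multiplication (q += k*p or p += k*q) instead of A's per-character additions.
import Mathlib
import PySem

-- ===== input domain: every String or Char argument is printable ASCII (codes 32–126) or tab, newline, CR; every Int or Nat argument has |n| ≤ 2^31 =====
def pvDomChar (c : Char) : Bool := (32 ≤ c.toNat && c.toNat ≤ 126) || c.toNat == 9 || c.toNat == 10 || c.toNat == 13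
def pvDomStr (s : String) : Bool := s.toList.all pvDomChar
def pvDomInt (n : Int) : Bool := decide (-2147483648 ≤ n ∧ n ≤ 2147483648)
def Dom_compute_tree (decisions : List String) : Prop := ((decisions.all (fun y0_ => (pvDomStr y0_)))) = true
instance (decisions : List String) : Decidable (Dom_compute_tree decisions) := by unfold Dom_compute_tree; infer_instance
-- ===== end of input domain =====

-- B replaces A's per-character additions with a run-length scan: each maximal run of k
-- equal symbols is applied with one multiplication (q += k*p or p += k*q); alternative, same cost.


-- ===== PORT A =====
-- for i in decisions[1:]: if i == '1': q = p + q else: p = p + q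
def compute_tree (decisions : List String) : Int × Int :=
  (PySem.List.slice decisions (some 1) none).foldl
    (fun pq i => if i = "1" then (pq.1, pq.1 + pq.2) else (pq.1 + pq.2, pq.2)) (1, 1)

-- ===== PORT B =====
-- spanEq x ys = (length of leading run of x in ys, remainder) — B's inner while loop
def spanEq (x : String) : List String → Nat × List String
  | [] => (0, [])
  | y :: ys => if y = x then ((spanEq x ys).1 + 1, (spanEq x ys).2) else (0, y :: ys)

theorem spanEq_rest_len (x : String) (ys : List String) : (spanEq x ys).2.length ≤ ys.length := by
  induction ys with
  | nil => simp [spanEq]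
  | cons y ys ih =>
    simp only [spanEq]
    split
    · exact le_trans ih (Nat.le_succ _)
    · simp

-- B's outer while loop: consume one maximal run per step, apply it multiplicatively
def altLoop (p q : Int) : List String → Int × Int
  | [] => (p, q)
  | x :: xs =>
    if x = "1" then altLoop p (q + (((spanEq x xs).1 : Int) + 1) * p) (spanEq x xs).2
    else altLoop (p + (((spanEq x xs).1 : Int) + 1) * q) q (spanEq x xs).2
  termination_by l => l.length
  decreasing_by
    · exact Nat.lt_succ_of_le (spanEq_rest_len x xs)
    · exact Nat.lt_succ_of_le (spanEq_rest_len x xs)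

def compute_tree_alt (decisions : List String) : Int × Int :=
  altLoop 1 1 decisions.tail

-- ===== PRECONDITION & SPEC =====
def Spec_compute_tree (decisions : List String) (out : Int × Int) : Prop := out = compute_tree_alt decisions
instance (decisions : List String) (out : Int × Int) : Decidable (Spec_compute_tree decisions out) := by unfold Spec_compute_tree; infer_instance

-- ===== CLAIM (what is proved, stated in full; the proofs are below) =====
def Claim_equal_compute_tree : Prop := ∀ (decisions : List String), Dom_compute_tree decisions → Spec_compute_tree decisions (compute_tree decisions)

-- ===== LEMMAS AND PROOFS =====
def stepA (pq : Int × Int) (i : String) : Int × Int :=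
  if i = "1" then (pq.1, pq.1 + pq.2) else (pq.1 + pq.2, pq.2)

theorem spanEq_decomp (x : String) (ys : List String) :
    ys = List.replicate (spanEq x ys).1 x ++ (spanEq x ys).2 := by
  induction ys with
  | nil => simp [spanEq]
  | cons y ys ih =>
    simp only [spanEq]
    split
    · next h => simpa [List.replicate_succ, h] using congrArg (y :: ·) ih
    · simp

theorem foldl_replicate (k : Nat) (x : String) (p q : Int) :
    (List.replicate k x).foldl stepA (p, q) =
      if x = "1" then (p, q + (k : Int) * p) else (p + (k : Int) * q, q) := by
  induction k generalizing q p with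
  | zero => simp
  | succ n ih =>
    simp only [List.replicate_succ, List.foldl_cons]
    by_cases h : x = "1"
    · rw [show stepA (p, q) x = (p, p + q) from by simp [stepA, h], ih, if_pos h, if_pos h]
      simp only [Prod.mk.injEq]
      exact ⟨trivial, by push_cast; ring⟩
    · rw [show stepA (p, q) x = (p + q, q) from by simp [stepA, h], ih, if_neg h, if_neg h]
      simp only [Prod.mk.injEq]
      exact ⟨by push_cast; ring, trivial⟩

theorem altLoop_eq_foldl (xs : List String) (p q : Int) :
    altLoop p q xs = xs.foldl stepA (p, q) := by
  induction p, q, xs using altLoop.induct with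
  | case1 p q => simp [altLoop]
  | case2 p q ys ih =>
    rw [altLoop, if_pos rfl, ih]
    conv_rhs => rw [spanEq_decomp "1" ys]
    rw [List.foldl_cons, List.foldl_append,
      show stepA (p, q) "1" = (p, p + q) from by simp [stepA], foldl_replicate, if_pos rfl]
    congr 2
    ring
  | case3 p q y ys hx ih =>
    rw [altLoop, if_neg hx, ih]
    conv_rhs => rw [spanEq_decomp y ys]
    rw [List.foldl_cons, List.foldl_append,
      show stepA (p, q) y = (p + q, q) from by simp [stepA, hx], foldl_replicate, if_neg hx]
    congr 2
    ring

-- ===== VERDICT (by name: the statement is the Claim_ definition above) =====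
theorem compute_tree_spec : Claim_equal_compute_tree := by
  intro decisions _
  unfold Spec_compute_tree compute_tree compute_tree_alt
  rw [altLoop_eq_foldl, PySem.List.slice_from_one]
  rfl
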